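-- pv_equiv track=rewrite | github.com/eric-s-s/dicetables_flask | big_random_numbers.py | slice_number
-- ===== SOURCE A (Python) =====
-- from math import log10
--
-- def slice_number(number, slice_size):
--     total_power = int(log10(number))
--     remaining_slices = total_power // slice_size
--     while remaining_slices >= 0:
--         top_slice, number = divmod(number, 10 ** (slice_size * remaining_slices))
--         power_of_ten_for_top_slice = remaining_slices * slice_size
--         yield top_slice, power_of_ten_for_top_slice
--         remaining_slices -= 1
-- ===== SOURCE B (Python) =====
-- def slice_number(number, slice_size):
--     chunks = []
--     power = 0
--     while number > 0:
--         chunk = 0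
--         mul = 1
--         for _ in range(slice_size):
--             number, digit = divmod(number, 10)
--             chunk += digit * mul
--             mul *= 10
--             if number == 0:
--                 break
--         chunks.append((chunk, power))
--         power += slice_size
--     for pair in reversed(chunks):
--         yield pair
-- ===== Notes on version B (the rewrite author's own statement) =====
-- stated objective: alternative
-- what changed: B extracts slices low-to-high, building each chunk one decimal digit at a time with a running multiplier (so the possibly huge power 10**slice_size is never formed), collects (chunk, power) pairs and yields them in reverse, instead of A's high-to-low loop that recomputes a shrinking power 10**(slice_size*remaining) each iteration.
-- outside the precondition, e.g. on slice_number(5, -1): A returns [(5, 0)], B does not finish within the time limit; on slice_number(50, -1): A returns [], B does not finish within the time limit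
import Mathlib
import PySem

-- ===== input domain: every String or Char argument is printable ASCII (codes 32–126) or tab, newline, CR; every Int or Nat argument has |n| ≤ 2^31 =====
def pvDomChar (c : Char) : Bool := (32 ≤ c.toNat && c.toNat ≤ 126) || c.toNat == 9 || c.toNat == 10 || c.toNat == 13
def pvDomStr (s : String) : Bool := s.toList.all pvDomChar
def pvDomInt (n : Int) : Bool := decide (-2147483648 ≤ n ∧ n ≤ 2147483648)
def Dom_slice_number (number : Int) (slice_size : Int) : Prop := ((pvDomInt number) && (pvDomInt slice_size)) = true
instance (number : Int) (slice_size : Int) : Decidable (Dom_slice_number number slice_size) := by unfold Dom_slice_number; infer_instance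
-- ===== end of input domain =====

-- B replaces A's high-to-low loop with shrinking powers 10**(slice_size*r) by a low-to-high
-- loop that peels one decimal digit at a time into the current chunk (never forming the
-- possibly huge power 10**slice_size), reversed at the end. Equality is of the yielded
-- sequences (both Python originals are generators).

-- ===== PORT A =====
-- A's while-loop: remaining_slices counts down from r to 0; fuel = r+1 iterations.
def sliceLoopA (number : Int) (slice_size : Int) (remaining : Int) : Nat → List (Int × Int)
  | 0 => []
  | fuel + 1 =>
    -- Python `10 ** (slice_size * remaining)`: the exponent is ≥ 0 for every input admitted
    -- by Pre_ (a negative exponent would make it a float in Python), so `.toNat` is exact here.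
    let d : Int := 10 ^ (slice_size * remaining).toNat
    (PySem.Int.floordiv number d, remaining * slice_size) ::
      sliceLoopA (PySem.Int.mod number d) slice_size (remaining - 1) fuel

def slice_number (number : Int) (slice_size : Int) : List (Int × Int) :=
  -- `int(log10(number))` ported as Nat.log 10 number.toNat: exact for 1 ≤ number ≤ 2^31
  -- (checked against CPython on this range); number ≤ 0 raises ValueError, excluded by Pre_.
  let total_power : Int := (Nat.log 10 number.toNat : Int)
  let remaining_slices : Int := PySem.Int.floordiv total_power slice_size
  sliceLoopA number slice_size remaining_slices (remaining_slices + 1).toNat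

-- ===== PORT B =====
-- Source B's inner for-loop: peel up to slice_size decimal digits (range(slice_size) iterations),
-- accumulating them into chunk with a running multiplier; break as soon as number hits 0.
-- `.toNat` on the range bound is exact: range(s) is empty for s ≤ 0.
def innerChunkB (number : Int) (chunk : Int) (mul : Int) : Nat → Int × Int
  | 0 => (number, chunk)
  | fuel + 1 =>
    let digit := PySem.Int.mod number 10
    let number' := PySem.Int.floordiv number 10
    let chunk' := chunk + digit * mul
    if number' = 0 then (number', chunk') else innerChunkB number' chunk' (mul * 10) fuel

-- Source B's outer while-loop: append (chunk, power) low-to-high.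
-- fuel = number.toNat bounds the iteration count (each pass strips ≥ 1 digit inside Pre_).
def sliceChunksB (slice_size : Int) (number : Int) (power : Int)
    (chunks : List (Int × Int)) : Nat → List (Int × Int)
  | 0 => chunks
  | fuel + 1 =>
    if number > 0 then
      let nc := innerChunkB number 0 1 slice_size.toNat
      sliceChunksB slice_size nc.1 (power + slice_size) (chunks ++ [(nc.2, power)]) fuel
    else chunks

def slice_number_alt (number : Int) (slice_size : Int) : List (Int × Int) :=
  (sliceChunksB slice_size number 0 [] number.toNat).reverse

-- ===== PRECONDITION & SPEC =====
-- Pre_ is the natural domain: A raises ValueError (log10) for number ≤ 0 and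
-- ZeroDivisionError for slice_size = 0.  For slice_size < 0 A still returns a value
-- ([] when number ≥ 10, one chunk for 1 ≤ number ≤ 9) — an accident of floor division
-- by a negative divisor, outside the function's natural domain, so Pre_ excludes
-- negative slice sizes as well (see cites).
def Pre_slice_number (number : Int) (slice_size : Int) : Prop :=
  1 ≤ number ∧ 1 ≤ slice_size
instance (number : Int) (slice_size : Int) : Decidable (Pre_slice_number number slice_size) := by
  unfold Pre_slice_number; infer_instance

def pvWitness_slice_number : Int × Int := (123456, 2)

def Spec_slice_number (number : Int) (slice_size : Int) (out : List (Int × Int)) : Prop :=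
  out = slice_number_alt number slice_size
instance (number : Int) (slice_size : Int) (out : List (Int × Int)) :
    Decidable (Spec_slice_number number slice_size out) := by
  unfold Spec_slice_number; infer_instance

-- ===== CLAIM (what is proved, stated in full; the proofs are below) =====
def Claim_equal_slice_number : Prop :=
  ∀ (number : Int) (slice_size : Int), Dom_slice_number number slice_size →
    Pre_slice_number number slice_size →
    Spec_slice_number number slice_size (slice_number number slice_size)

-- ===== LEMMAS AND PROOFS =====

theorem pow_toNat_mul (s : Int) (hs : 0 ≤ s) (r : Nat) :
    (10:Int) ^ (s * (r : Int)).toNat = ((10:Int) ^ s.toNat) ^ r := by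
  obtain ⟨k, rfl⟩ := Int.eq_ofNat_of_zero_le hs
  rw [← pow_mul, ← Nat.cast_mul, Int.toNat_natCast, Int.toNat_natCast]

-- characterisation of A's loop: high-first slices (n / b^j) % b for j = r, r-1, …, 0
theorem sliceLoopA_char (s : Int) (hs : 1 ≤ s) (r : Nat) (n : Int) (hn : 0 ≤ n)
    (hub : n < ((10:Int) ^ s.toNat) ^ (r + 1)) :
    sliceLoopA n s (r : Int) (r + 1) =
      ((List.range (r + 1)).reverse).map
        (fun (j : Nat) => (n / ((10:Int) ^ s.toNat) ^ j % ((10:Int) ^ s.toNat), (j : Int) * s)) := by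
  have hb : (0:Int) < (10:Int) ^ s.toNat := by positivity
  induction r generalizing n with
  | zero =>
    rw [show sliceLoopA n s ((0:Nat) : Int) 1
        = [(PySem.Int.floordiv n ((10:Int) ^ (s * ((0:Nat):Int)).toNat), ((0:Nat):Int) * s)] by
      simp [sliceLoopA]]
    rw [pow_toNat_mul s (by omega)]
    rw [PySem.Int.floordiv_eq_ediv_of_pos (by positivity)]
    have : n % (10:Int) ^ s.toNat = n := Int.emod_eq_of_lt hn (by simpa using hub)
    simp [this]
  | succ r ih =>
    have hd : (10:Int) ^ (s * ((r+1 : Nat):Int)).toNat = ((10:Int) ^ s.toNat) ^ (r+1) :=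
      pow_toNat_mul s (by omega) (r+1)
    have hdp : (0:Int) < ((10:Int) ^ s.toNat) ^ (r+1) := by positivity
    rw [show sliceLoopA n s ((r+1 : Nat) : Int) (r + 2)
        = (PySem.Int.floordiv n ((10:Int) ^ (s * ((r+1:Nat):Int)).toNat), ((r+1:Nat):Int) * s) ::
            sliceLoopA (PySem.Int.mod n ((10:Int) ^ (s * ((r+1:Nat):Int)).toNat)) s
              (((r+1:Nat):Int) - 1) (r + 1) by simp [sliceLoopA]]
    rw [hd, PySem.Int.floordiv_eq_ediv_of_pos hdp, PySem.Int.mod_eq_emod_of_pos hdp]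
    have hcast : ((r+1:Nat):Int) - 1 = (r : Int) := by push_cast; ring
    rw [hcast]
    set b := (10:Int) ^ s.toNat with hbdef
    set n' := n % b ^ (r+1) with hn'def
    have hn'0 : 0 ≤ n' := Int.emod_nonneg n (by positivity)
    have hn'ub : n' < b ^ (r+1) := Int.emod_lt_of_pos n hdp
    rw [ih n' hn'0 hn'ub]
    -- reshape RHS: range (r+2) reversed = (r+1) :: (range (r+1)).reverse
    rw [show List.range (r+2) = List.range (r+1) ++ [r+1] from List.range_succ]
    rw [List.reverse_append]
    simp only [List.reverse_singleton, List.singleton_append, List.map_cons]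
    -- head slice: n / b^(r+1) < b, so the % b is the identity
    have hq : n / b ^ (r+1) % b = n / b ^ (r+1) := by
      apply Int.emod_eq_of_lt (Int.ediv_nonneg hn (le_of_lt hdp))
      rw [Int.ediv_lt_iff_lt_mul hdp, ← pow_succ']
      exact hub
    rw [hq]
    congr 1
    apply List.map_congr_left
    intro j hj
    have hjle : j ≤ r := by
      simp only [List.mem_reverse, List.mem_range] at hj; omega
    set q := n / b ^ (r+1) with hqdef
    have hsplit : n = n' + b ^ j * (b ^ (r + 1 - j) * q) := by
      have h2 : b ^ j * b ^ (r + 1 - j) = b ^ (r+1) := by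
        rw [← pow_add]; congr 1; omega
      have h1 : b ^ (r+1) * q + n' = n := Int.ediv_add_emod n (b ^ (r+1))
      calc n = b ^ (r+1) * q + n' := h1.symm
        _ = n' + b ^ j * (b ^ (r + 1 - j) * q) := by rw [← h2]; ring
    have hbj : (0:Int) < b ^ j := by positivity
    have hdvd : n / b ^ j = n' / b ^ j + b ^ (r + 1 - j) * q := by
      conv_lhs => rw [hsplit]
      exact Int.add_mul_ediv_left _ _ (ne_of_gt hbj)
    have hmod : n / b ^ j % b = n' / b ^ j % b := by
      rw [hdvd]
      have h3 : b ^ (r + 1 - j) = b * b ^ (r - j) := by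
        rw [← pow_succ']; congr 1; omega
      rw [h3, mul_assoc, Int.add_mul_emod_self_left]
    rw [hmod]

-- proof-side helper: B's outer loop with the chunk extraction replaced by a single
-- division by base = 10^slice_size (innerChunkB is shown equal to that divmod below)
def sliceLoopB (base : Int) (slice_size : Int) (number : Int) (power : Int)
    (chunks : List (Int × Int)) : Nat → List (Int × Int)
  | 0 => chunks
  | fuel + 1 =>
    if number > 0 then
      sliceLoopB base slice_size (PySem.Int.floordiv number base) (power + slice_size)
        (chunks ++ [(PySem.Int.mod number base, power)]) fuel
    else chunks

theorem sliceLoopB_nonpos (b s n p : Int) (acc : List (Int × Int)) (f : Nat) (hn : ¬ n > 0) :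
    sliceLoopB b s n p acc f = acc := by
  cases f <;> simp [sliceLoopB, hn]

-- characterisation of B's loop: low-first slices appended to chunks
theorem sliceLoopB_char (s : Int) (r : Nat) (n p : Int)
    (acc : List (Int × Int)) (fuel : Nat) (hfuel : r + 1 ≤ fuel)
    (hlb : ((10:Int) ^ s.toNat) ^ r ≤ n) (hub : n < ((10:Int) ^ s.toNat) ^ (r + 1)) :
    sliceLoopB ((10:Int) ^ s.toNat) s n p acc fuel =
      acc ++ (List.range (r + 1)).map
        (fun (j : Nat) => (n / ((10:Int) ^ s.toNat) ^ j % ((10:Int) ^ s.toNat), p + (j : Int) * s)) := by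
  have hb : (0:Int) < (10:Int) ^ s.toNat := by positivity
  induction r generalizing n p acc fuel with
  | zero =>
    obtain ⟨f, rfl⟩ : ∃ f, fuel = f + 1 := ⟨fuel - 1, by omega⟩
    have hn : n > 0 := by simpa using lt_of_lt_of_le one_pos (by simpa using hlb)
    have hdiv : n / (10:Int) ^ s.toNat = 0 :=
      Int.ediv_eq_zero_of_lt (by omega) (by simpa using hub)
    rw [show sliceLoopB ((10:Int) ^ s.toNat) s n p acc (f+1)
        = sliceLoopB ((10:Int) ^ s.toNat) s (PySem.Int.floordiv n ((10:Int) ^ s.toNat)) (p + s)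
            (acc ++ [(PySem.Int.mod n ((10:Int) ^ s.toNat), p)]) f by simp [sliceLoopB, hn]]
    rw [PySem.Int.floordiv_eq_ediv_of_pos hb, PySem.Int.mod_eq_emod_of_pos hb, hdiv,
      sliceLoopB_nonpos _ _ _ _ _ _ (by simp)]
    simp
  | succ r ih =>
    obtain ⟨f, rfl⟩ : ∃ f, fuel = f + 1 := ⟨fuel - 1, by omega⟩
    have hbp : (0:Int) < ((10:Int) ^ s.toNat) ^ (r + 1) := by positivity
    have hn : n > 0 := lt_of_lt_of_le hbp hlb
    rw [show sliceLoopB ((10:Int) ^ s.toNat) s n p acc (f+1)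
        = sliceLoopB ((10:Int) ^ s.toNat) s (PySem.Int.floordiv n ((10:Int) ^ s.toNat)) (p + s)
            (acc ++ [(PySem.Int.mod n ((10:Int) ^ s.toNat), p)]) f by simp [sliceLoopB, hn]]
    rw [PySem.Int.floordiv_eq_ediv_of_pos hb, PySem.Int.mod_eq_emod_of_pos hb]
    rw [ih (n / (10:Int) ^ s.toNat) (p + s) _ f (by omega)
      (by rw [Int.le_ediv_iff_mul_le hb, ← pow_succ]; exact hlb)
      (by rw [Int.ediv_lt_iff_lt_mul hb, ← pow_succ]; exact hub)]
    rw [List.range_succ_eq_map (n := r + 1)]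
    simp only [List.map_cons, List.map_map, List.append_assoc, List.cons_append,
      List.nil_append, pow_zero, Int.ediv_one, Nat.cast_zero, zero_mul, add_zero]
    congr 2
    apply List.map_congr_left
    intro j hj
    simp only [Function.comp_apply, Nat.succ_eq_add_one, Prod.mk.injEq]
    refine ⟨?_, by push_cast; ring⟩
    rw [Int.ediv_ediv_eq_ediv_mul (le_of_lt hb), ← pow_succ']

-- the inner digit loop computes divmod(number, 10^fuel)
theorem innerChunkB_eq (f : Nat) : ∀ (n c mu : Int), 0 ≤ n →
    innerChunkB n c mu f = (n / (10:Int) ^ f, c + n % (10:Int) ^ f * mu) := by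
  induction f with
  | zero => intro n c mu hn; simp [innerChunkB]
  | succ f ih =>
    intro n c mu hn
    have h10 : (0:Int) < 10 := by norm_num
    rw [show innerChunkB n c mu (f+1)
        = (if PySem.Int.floordiv n 10 = 0
            then (PySem.Int.floordiv n 10, c + PySem.Int.mod n 10 * mu)
            else innerChunkB (PySem.Int.floordiv n 10) (c + PySem.Int.mod n 10 * mu) (mu * 10) f)
        by simp [innerChunkB]]
    rw [PySem.Int.floordiv_eq_ediv_of_pos h10, PySem.Int.mod_eq_emod_of_pos h10]
    have hA : (0:Int) < (10:Int) ^ f := by positivity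
    have hpow : (10:Int) ^ (f+1) = 10 * (10:Int) ^ f := by rw [pow_succ']
    split_ifs with h0
    · -- number became 0: n < 10, the remaining chunk is all of n
      have hn10 : n < 10 := by omega
      have hlt : n < (10:Int) ^ (f+1) := by
        have : (10:Int) ≤ 10 ^ (f+1) := le_self_pow₀ (by norm_num) (by omega)
        omega
      rw [Int.ediv_eq_zero_of_lt hn hlt, Int.emod_eq_of_lt hn hlt]
      have : n % 10 = n := by omega
      rw [this, h0]
    · rw [ih _ _ _ (by omega)]
      have he1 : n / 10 / (10:Int) ^ f = n / (10:Int) ^ (f+1) := by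
        rw [Int.ediv_ediv_eq_ediv_mul (by norm_num), ← hpow]
      have hkey : n % (10:Int) ^ (f+1) = n % 10 + 10 * (n / 10 % (10:Int) ^ f) := by
        set A := (10:Int) ^ f with hAdef
        set qq := n / 10 / A with hqq
        have e2 : A * qq + n / 10 % A = n / 10 := Int.ediv_add_emod (n/10) A
        have hr1 : 0 ≤ n / 10 % A := Int.emod_nonneg _ (by positivity)
        have hr2 : n / 10 % A < A := Int.emod_lt_of_pos _ hA
        have hx : 0 ≤ n % 10 + 10 * (n / 10 % A) ∧
            n % 10 + 10 * (n / 10 % A) < 10 * A := by omega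
        have hsplit : n = (n % 10 + 10 * (n / 10 % A)) + 10 * A * qq := by
          have e1 : 10 * (n / 10) + n % 10 = n := Int.ediv_add_emod n 10
          calc n = 10 * (n / 10) + n % 10 := e1.symm
            _ = 10 * (A * qq + n / 10 % A) + n % 10 := by rw [e2]
            _ = (n % 10 + 10 * (n / 10 % A)) + 10 * A * qq := by ring
        rw [hpow]
        conv_lhs => rw [hsplit]
        rw [Int.add_mul_emod_self_left, Int.emod_eq_of_lt hx.1 hx.2]
      rw [he1, hkey]
      simp only [Prod.mk.injEq]
      exact ⟨trivial, by ring⟩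

-- hence B's outer loop coincides with the single-division loop
theorem sliceChunksB_eq_loop (s : Int) (fuel : Nat) : ∀ (n p : Int) (acc : List (Int × Int)),
    0 ≤ n →
    sliceChunksB s n p acc fuel = sliceLoopB ((10:Int) ^ s.toNat) s n p acc fuel := by
  induction fuel with
  | zero => intro n p acc _; rfl
  | succ fuel ih =>
    intro n p acc hn
    have hb : (0:Int) < (10:Int) ^ s.toNat := by positivity
    by_cases hpos : n > 0
    · rw [show sliceChunksB s n p acc (fuel+1)
          = sliceChunksB s (innerChunkB n 0 1 s.toNat).1 (p + s)
              (acc ++ [((innerChunkB n 0 1 s.toNat).2, p)]) fuel by simp [sliceChunksB, hpos]]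
      rw [show sliceLoopB ((10:Int) ^ s.toNat) s n p acc (fuel+1)
          = sliceLoopB ((10:Int) ^ s.toNat) s (PySem.Int.floordiv n ((10:Int) ^ s.toNat)) (p + s)
              (acc ++ [(PySem.Int.mod n ((10:Int) ^ s.toNat), p)]) fuel by
        simp [sliceLoopB, hpos]]
      rw [innerChunkB_eq s.toNat n 0 1 hn,
        PySem.Int.floordiv_eq_ediv_of_pos hb, PySem.Int.mod_eq_emod_of_pos hb]
      simp only [zero_add, mul_one]
      exact ih _ _ _ (Int.ediv_nonneg hn (le_of_lt hb))
    · cases fuel <;> simp [sliceChunksB, sliceLoopB, hpos]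

-- ===== VERDICT (by name: the statement is the Claim_ definition above) =====
theorem slice_number_spec : Claim_equal_slice_number := by
  intro number slice_size _hdom hpre
  obtain ⟨h1, hs⟩ := hpre
  set k := slice_size.toNat with hkdef
  set m := number.toNat with hmdef
  set tp := Nat.log 10 m with htpdef
  set r := tp / k with hrdef
  have hk1 : 1 ≤ k := by omega
  have hm1 : 1 ≤ m := by omega
  have hnum : number = (m : Int) := by omega
  have hsk : slice_size = (k : Int) := by omega
  -- remaining_slices = r
  have hfd : PySem.Int.floordiv ((tp : Nat) : Int) slice_size = (r : Int) := by
    rw [hsk]; exact_mod_cast PySem.Int.floordiv_natCast tp k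
  -- Nat-level bounds: 10^(k*r) ≤ m < 10^(k*(r+1))
  have hkr_le : k * r ≤ tp := by
    calc k * r = r * k := Nat.mul_comm k r
      _ ≤ tp := Nat.div_mul_le_self tp k
  have htp_lt : tp + 1 ≤ k * (r + 1) := by
    have e1 : k * r + tp % k = tp := Nat.div_add_mod tp k
    have e2 : tp % k < k := Nat.mod_lt _ (by omega)
    have e3 : k * (r + 1) = k * r + k := Nat.mul_succ k r
    omega
  have hlbN : 10 ^ (k * r) ≤ m :=
    le_trans (Nat.pow_le_pow_right (by norm_num) hkr_le) (Nat.pow_log_le_self 10 (by omega))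
  have hubN : m < 10 ^ (k * (r + 1)) :=
    lt_of_lt_of_le (Nat.lt_pow_succ_log_self (by norm_num) m)
      (Nat.pow_le_pow_right (by norm_num) htp_lt)
  -- Int-level bounds with b = (10 : Int) ^ k
  have hlbI : ((10:Int) ^ k) ^ r ≤ number := by
    rw [hnum, ← pow_mul]; exact_mod_cast hlbN
  have hubI : number < ((10:Int) ^ k) ^ (r + 1) := by
    rw [hnum, ← pow_mul]; exact_mod_cast hubN
  -- enough fuel for B's loop: r + 1 ≤ m
  have hfuelB : r + 1 ≤ m := by
    have hr1 : r < 10 ^ r := Nat.lt_pow_self (by norm_num)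
    have hr2 : (10:Nat) ^ r ≤ 10 ^ (k * r) :=
      Nat.pow_le_pow_right (by norm_num) (Nat.le_mul_of_pos_left r (by omega))
    omega
  -- rewrite both ports through the characterisations
  show slice_number number slice_size = slice_number_alt number slice_size
  have eA : slice_number number slice_size
      = sliceLoopA number slice_size (r : Int) (r + 1) := by
    show sliceLoopA number slice_size
        (PySem.Int.floordiv ((Nat.log 10 number.toNat : Nat) : Int) slice_size)
        ((PySem.Int.floordiv ((Nat.log 10 number.toNat : Nat) : Int) slice_size) + 1).toNat
      = _
    rw [show ((Nat.log 10 number.toNat : Nat) : Int) = ((tp : Nat) : Int) by rw [htpdef, hmdef]]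
    rw [hfd]
    congr 1
  have eB : slice_number_alt number slice_size
      = (sliceLoopB ((10:Int) ^ k) slice_size number 0 [] m).reverse := by
    show (sliceChunksB slice_size number 0 [] m).reverse = _
    rw [sliceChunksB_eq_loop slice_size m number 0 [] (by omega)]
  rw [eA, eB, sliceLoopA_char slice_size hs r number (by omega) hubI,
    sliceLoopB_char slice_size r number 0 [] m hfuelB hlbI hubI]
  rw [List.nil_append, List.map_reverse]
  simp
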